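-- pv_equiv track=rewrite | github.com/Nuage21/Irman-Translator | Translator/classes/rule/__init__.py | rm_indicators
-- ===== SOURCE A (Python) =====
-- def rm_indicators(text):
--     bar_ind0 = -1
--     i = 0
--     result = ''
--     after_bar = ''
--     for letter in text:
--         if letter == '|':
--             if bar_ind0 < 0:
--                 bar_ind0 = i
--             else:
--                 bar_ind0 = -1
--                 after_bar = ''
--         else:
--             if bar_ind0 >= 0:
--                 after_bar = after_bar + letter
--             else:
--                 result = result + letter
--         i = i + 1
--     return result
-- ===== SOURCE B (Python) =====
-- def rm_indicators(text):
--     parts = text.split('|')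
--     return ''.join(parts[::2])
-- ===== Notes on version B (the rewrite author's own statement) =====
-- stated objective: faster
-- what changed: Replaces the per-character state machine (toggle flag, running index, two accumulator strings built by repeated concatenation) with splitting the text on the bar separator and joining the even-indexed segments.
import Mathlib
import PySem

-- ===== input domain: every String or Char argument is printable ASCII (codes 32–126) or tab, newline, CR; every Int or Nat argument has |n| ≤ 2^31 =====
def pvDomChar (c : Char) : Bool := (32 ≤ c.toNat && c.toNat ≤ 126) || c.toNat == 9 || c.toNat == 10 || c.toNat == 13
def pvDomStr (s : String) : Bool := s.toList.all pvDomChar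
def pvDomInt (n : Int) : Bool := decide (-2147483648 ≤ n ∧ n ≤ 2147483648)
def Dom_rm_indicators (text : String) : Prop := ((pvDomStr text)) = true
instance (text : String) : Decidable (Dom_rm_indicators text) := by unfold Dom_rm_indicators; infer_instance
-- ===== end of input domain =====

-- B replaces A's per-character toggle state machine (with quadratic string concatenation)
-- by splitting on the bar separator and joining the even-indexed segments.

-- ===== PORT A =====
-- A's for-loop over the characters, with the same state: bar_ind0, i, result, after_bar
-- (result/after_bar kept as List Char, converted to String at the end).
def rmLoop : List Char → Int → Int → List Char → List Char → List Char
  | [], _, _, res, _ => res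
  | c :: rest, bar, i, res, aft =>
    if c = '|' then
      if bar < 0 then rmLoop rest i (i + 1) res aft
      else rmLoop rest (-1) (i + 1) res []
    else
      if bar ≥ 0 then rmLoop rest bar (i + 1) res (aft ++ [c])
      else rmLoop rest bar (i + 1) (res ++ [c]) aft

def rm_indicators (text : String) : String :=
  String.ofList (rmLoop text.toList (-1) 0 [] [])

-- ===== PORT B =====
-- Source B: parts = text.split('|'); return ''.join(parts[::2])
def rm_indicators_alt (text : String) : String :=
  match PySem.Str.split? text "|" with
  | some parts =>
    match PySem.List.slice? parts none none 2 with
    | some kept => PySem.Str.join "" kept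
    | none => ""      -- unreachable: step 2 ≠ 0
  | none => ""        -- unreachable: separator "|" is non-empty

-- ===== PRECONDITION & SPEC =====
def Spec_rm_indicators (text : String) (out : String) : Prop := out = rm_indicators_alt text
instance (text : String) (out : String) : Decidable (Spec_rm_indicators text out) := by unfold Spec_rm_indicators; infer_instance

-- ===== CLAIM (what is proved, stated in full; the proofs are below) =====
def Claim_equal_rm_indicators : Prop := ∀ (text : String), Dom_rm_indicators text → Spec_rm_indicators text (rm_indicators text)

-- ===== LEMMAS AND PROOFS =====

-- simple split on '|'
def pvConsHead {α : Type} (p : List α) : List (List α) → List (List α)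
  | [] => [p]
  | h :: t => (p ++ h) :: t

def pvSplitBar : List Char → List (List Char)
  | [] => [[]]
  | c :: rest => if c = '|' then [] :: pvSplitBar rest else pvConsHead [c] (pvSplitBar rest)

-- even-indexed elements
def pvEvens {α : Type} : List α → List α
  | [] => []
  | [x] => [x]
  | x :: _ :: r => x :: pvEvens r

theorem pvSplitBar_ne_nil (l : List Char) : pvSplitBar l ≠ [] := by
  cases l with
  | nil => simp [pvSplitBar]
  | cons c rest =>
    simp only [pvSplitBar]
    split
    · simp
    · cases h : pvSplitBar rest <;> simp [pvConsHead]

theorem pvConsHead_consHead {α : Type} (a b : List α) (l : List (List α)) :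
    pvConsHead a (pvConsHead b l) = pvConsHead (a ++ b) l := by
  cases l <;> simp [pvConsHead]

theorem pvGo (fuel : Nat) : ∀ (l cur : List Char) (acc : List (List Char)),
    l.length < fuel →
    PySem.Chars.splitOn.go ['|'] fuel l cur acc =
      acc.reverse ++ pvConsHead cur.reverse (pvSplitBar l) := by
  induction fuel with
  | zero => intro l cur acc h; omega
  | succ f ih =>
    intro l cur acc h
    cases l with
    | nil =>
      rw [PySem.Chars.splitOn.go]
      simp [pvSplitBar, pvConsHead]
      omega
    | cons c rest =>
      rw [PySem.Chars.splitOn.go]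
      by_cases hc : c = '|'
      · subst hc
        have hp : List.isPrefixOf ['|'] ('|' :: rest) = true := by
          simp [List.isPrefixOf]
        simp only [hp, if_true, List.length_nil, List.length_cons, List.drop_succ_cons,
          List.drop_zero]
        rw [ih rest [] (cur.reverse :: acc) (by simpa using Nat.lt_of_succ_lt_succ h)]
        simp [pvSplitBar, pvConsHead]
        cases hs : pvSplitBar rest with
        | nil => exact absurd hs (pvSplitBar_ne_nil rest)
        | cons h t => simp
      · have hp : List.isPrefixOf ['|'] (c :: rest) = false := by
          simp [List.isPrefixOf]
          exact fun h => absurd h.symm hc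
        simp only [hp, Bool.false_eq_true, if_false]
        rw [ih rest (c :: cur) acc (by simpa using Nat.lt_of_succ_lt_succ h)]
        simp [pvSplitBar, hc, List.reverse_cons, pvConsHead_consHead]

theorem splitOn_bar (l : List Char) : PySem.Chars.splitOn l ['|'] = pvSplitBar l := by
  unfold PySem.Chars.splitOn
  rw [pvGo (l.length + 1) l [] [] (Nat.lt_succ_self _)]
  simp
  cases h : pvSplitBar l with
  | nil => exact absurd h (pvSplitBar_ne_nil l)
  | cons a t => simp [pvConsHead]

-- flatten of even-indexed segments after prepending to the head segment
theorem pvEvens_consHead_flatten (p : List Char) (l : List (List Char)) :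
    (pvEvens (pvConsHead p l)).flatten = p ++ (pvEvens l).flatten := by
  cases l with
  | nil => simp [pvConsHead, pvEvens]
  | cons h t =>
    cases t <;> simp [pvConsHead, pvEvens]

theorem pvEvens_nil_cons (l : List (List Char)) (hl : l ≠ []) :
    pvEvens (([] : List Char) :: l) = ([] : List Char) :: pvEvens l.tail := by
  cases l with
  | nil => simp at hl
  | cons h t => simp [pvEvens]

-- A's loop computes the flatten of the even-/odd-indexed segments of the split,
-- according to whether the current state is outside (bar < 0) or inside a bar pair.
theorem rmLoop_spec (cs : List Char) : ∀ (bar i : Int) (res aft : List Char), 0 ≤ i →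
    rmLoop cs bar i res aft =
      res ++ (if bar < 0 then (pvEvens (pvSplitBar cs)).flatten
              else (pvEvens (pvSplitBar cs).tail).flatten) := by
  induction cs with
  | nil =>
    intro bar i res aft _
    simp [rmLoop, pvSplitBar, pvEvens]
  | cons c rest ih =>
    intro bar i res aft hi
    by_cases hc : c = '|'
    · subst hc
      have hsb : pvSplitBar ('|' :: rest) = [] :: pvSplitBar rest := by simp [pvSplitBar]
      by_cases hb : bar < 0
      · have step : rmLoop ('|' :: rest) bar i res aft = rmLoop rest i (i + 1) res aft := by
          simp [rmLoop, hb]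
        rw [step, ih i (i + 1) res aft (by omega), hsb]
        rw [if_neg (by omega : ¬ i < 0), if_pos hb,
          pvEvens_nil_cons _ (pvSplitBar_ne_nil rest)]
        simp
      · have step : rmLoop ('|' :: rest) bar i res aft = rmLoop rest (-1) (i + 1) res [] := by
          simp [rmLoop, hb]
        rw [step, ih (-1) (i + 1) res [] (by omega), hsb, if_neg hb,
          if_pos (by norm_num : (-1 : Int) < 0)]
        simp
    · have hsb : pvSplitBar (c :: rest) = pvConsHead [c] (pvSplitBar rest) := by
        simp [pvSplitBar, hc]
      by_cases hb : bar < 0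
      · have step : rmLoop (c :: rest) bar i res aft = rmLoop rest bar (i + 1) (res ++ [c]) aft := by
          simp [rmLoop, hc, show ¬ bar ≥ 0 by omega]
        rw [step, ih bar (i + 1) (res ++ [c]) aft (by omega), hsb,
          if_pos hb, if_pos hb, pvEvens_consHead_flatten]
        simp
      · have step : rmLoop (c :: rest) bar i res aft = rmLoop rest bar (i + 1) res (aft ++ [c]) := by
          simp [rmLoop, hc, show bar ≥ 0 by omega]
        rw [step, ih bar (i + 1) res (aft ++ [c]) (by omega), hsb,
          if_neg hb, if_neg hb]
        cases h : pvSplitBar rest with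
        | nil => exact absurd h (pvSplitBar_ne_nil rest)
        | cons a t => simp [pvConsHead]

theorem pvEvens_map {α β : Type} (f : α → β) (l : List α) :
    pvEvens (l.map f) = (pvEvens l).map f := by
  induction l using pvEvens.induct <;> simp [pvEvens, *]

theorem join_nil_flatten (l : List (List Char)) :
    PySem.Chars.join [] l = l.flatten := by
  induction l with
  | nil => simp [PySem.Chars.join_nil]
  | cons h t ih =>
    cases t with
    | nil => simp [PySem.Chars.join_singleton]
    | cons a b => rw [PySem.Chars.join_cons_cons]; simp [ih]

-- [::2] = even-indexed elements
theorem pvFM {α : Type} (xs : List α) :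
    List.filterMap (fun (k : Nat) => xs[((2 : Int) * (k : Int)).toNat]?)
      (List.range ((xs.length + 1) / 2)) = pvEvens xs := by
  induction xs using pvEvens.induct with
  | case1 => simp [pvEvens]
  | case2 x => simp [pvEvens, List.range_succ]
  | case3 x y r ih =>
    have h : ((x :: y :: r).length + 1) / 2 = (r.length + 1) / 2 + 1 := by
      simp; omega
    rw [h, List.range_succ_eq_map, List.filterMap_cons, List.filterMap_map]
    have h0 : ((2 * ((0 : Nat) : Int)).toNat) = 0 := by norm_num
    simp only [h0, List.getElem?_cons_zero]
    rw [show pvEvens (x :: y :: r) = x :: pvEvens r from rfl, ← ih]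
    have : ∀ k : Nat, ((fun k : Nat => (x :: y :: r)[((2:Int) * (k:Int)).toNat]?) ∘ Nat.succ) k
        = (fun k : Nat => r[((2:Int) * (k:Int)).toNat]?) k := by
      intro k
      have h1 : ((2:Int) * (((k : Nat) : Int) + 1)).toNat = 2 * k + 1 + 1 := by omega
      have h2 : ((2:Int) * ((k : Nat) : Int)).toNat = 2 * k := by omega
      simp only [Function.comp, Nat.succ_eq_add_one, Nat.cast_add, Nat.cast_one, h1, h2,
        List.getElem?_cons_succ]
    rw [List.filterMap_congr (fun k _ => this k)]

theorem slice?_two {α : Type} (xs : List α) :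
    PySem.List.slice? xs none none 2 = some (pvEvens xs) := by
  simp only [PySem.List.slice?, PySem.List.sliceIndices]
  norm_num
  have hcount : (if 0 < xs.length then (((xs.length : Int) + 2 - 1) / 2).toNat else 0)
      = (xs.length + 1) / 2 := by
    rcases Nat.eq_zero_or_pos xs.length with h | h
    · simp [h]
    · rw [if_pos h]; omega
  rw [hcount]
  exact pvFM xs

theorem rm_indicators_alt_eq (text : String) :
    rm_indicators_alt text = String.ofList (pvEvens (pvSplitBar text.toList)).flatten := by
  unfold rm_indicators_alt
  have hsep : ("|" : String).toList = ['|'] := by decide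
  simp only [PySem.Str.split?, PySem.Chars.split?, hsep]
  norm_num
  rw [splitOn_bar, slice?_two]
  simp only [PySem.Str.join, pvEvens_map]
  have hempty : ("" : String).toList = [] := by decide
  rw [hempty]
  simp only [List.map_map]
  have : (String.toList ∘ String.ofList) = id := by
    funext l; simp
  rw [this, List.map_id, join_nil_flatten]

-- ===== VERDICT (by name: the statement is the Claim_ definition above) =====
theorem rm_indicators_spec : Claim_equal_rm_indicators := by
  intro text _
  unfold Spec_rm_indicators
  rw [rm_indicators_alt_eq]
  unfold rm_indicators
  rw [rmLoop_spec text.toList (-1) 0 [] [] (le_refl 0)]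
  norm_num
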